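-- pv_equiv track=rewrite | github.com/naruto678/codeforces | code-brew/TaskE.py | compute_sum
-- ===== SOURCE A (Python) =====
-- def compute_sum(arr, idx, step, comp_index):
--     curr_sum = arr[idx]
--     comp_index.add(idx)
--     count = 1
--     start_idx = (idx+step) % len(arr)
--     while start_idx!=idx:
--         curr_sum += arr[start_idx]
--         count += 1
--         comp_index.add(start_idx)
--         start_idx = (start_idx+ step)%len(arr)
--     if count * step !=len(arr):
--         return 10**9
--     return curr_sum
-- ===== SOURCE B (Python) =====
-- def _gcd(a, b):
--     while b:
--         a, b = b, a % b
--     return a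
--
-- def compute_sum(arr, idx, step, comp_index):
--     # The indices A visits are exactly the residue class of idx modulo
--     # g = gcd(n, step): seed with arr[idx] itself, then scan the array once
--     # left-to-right adding the rest of that class. No modular stepping occurs.
--     total = arr[idx]
--     comp_index.add(idx)
--     n = len(arr)
--     g = _gcd(n, step % n)
--     r = idx % g
--     for j in range(n):
--         if j % g == r and j != idx:
--             total += arr[j]
--             comp_index.add(j)
--     if (n // g) * step != n:
--         return 10**9
--     return total
-- ===== Notes on version B (the rewrite author's own statement) =====
-- stated objective: alternative
-- what changed: Instead of walking the modular step-cycle from idx, B observes that the visited indices are exactly the residue class idx mod gcd(n, step) and sums them by seeding with arr[idx] and one left-to-right scan of the array filtered by j % g == idx % g; no modular stepping or cycle detection occurs.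
-- outside the precondition, e.g. on compute_sum([1, 2], -1, 1, set()): A does not finish within the time limit, B returns 5
import Mathlib
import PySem

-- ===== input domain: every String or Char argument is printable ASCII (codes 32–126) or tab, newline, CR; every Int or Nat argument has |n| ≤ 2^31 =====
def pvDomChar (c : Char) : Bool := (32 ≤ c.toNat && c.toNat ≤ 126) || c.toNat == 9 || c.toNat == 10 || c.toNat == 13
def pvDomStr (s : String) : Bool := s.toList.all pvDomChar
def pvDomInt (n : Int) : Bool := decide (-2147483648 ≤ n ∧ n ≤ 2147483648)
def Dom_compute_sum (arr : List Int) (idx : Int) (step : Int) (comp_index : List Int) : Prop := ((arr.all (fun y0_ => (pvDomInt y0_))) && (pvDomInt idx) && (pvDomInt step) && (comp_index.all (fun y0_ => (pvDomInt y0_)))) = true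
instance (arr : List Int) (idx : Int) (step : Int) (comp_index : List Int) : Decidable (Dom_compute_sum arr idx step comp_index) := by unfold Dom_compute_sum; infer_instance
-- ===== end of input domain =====

-- B replaces A's walk around the modular step-cycle by a single left-to-right scan of
-- the array summing the residue class j % gcd(n, step) == idx % gcd(n, step), which is
-- exactly the set of indices A visits. Both Pythons mutate the set `comp_index` (same
-- elements added, different order); the equivalence proved here is about the RETURN value only.

-- ===== PORT A =====
-- the while loop of A; fuel = len(arr) suffices on Pre_ (the cycle has ≤ len(arr) steps)
def pvLoopA (arr : List Int) (idx step : Int) : Nat → Int → Int → Int → Int × Int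
  | fuel, start, acc, cnt =>
    if start = idx then (acc, cnt)
    else match fuel with
      | 0 => (acc, cnt)
      | f + 1 => pvLoopA arr idx step f (PySem.Int.mod (start + step) (arr.length : Int))
          (acc + PySem.List.pyGetD arr start 0) (cnt + 1)

def compute_sum (arr : List Int) (idx : Int) (step : Int) (comp_index : List Int) : Int :=
  let curr_sum := PySem.List.pyGetD arr idx 0
  let start_idx := PySem.Int.mod (idx + step) (arr.length : Int)
  let r := pvLoopA arr idx step arr.length start_idx curr_sum 1
  if r.2 * step ≠ (arr.length : Int) then (10:Int)^9 else r.1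

-- ===== PORT B =====
-- Source B's hand-written Euclid; fuel = b.toNat suffices (b strictly decreases)
def pvGcdLoop : Nat → Int → Int → Int
  | fuel, a, b =>
    if b = 0 then a
    else match fuel with
      | 0 => a
      | f + 1 => pvGcdLoop f b (PySem.Int.mod a b)

def compute_sum_alt (arr : List Int) (idx : Int) (step : Int) (comp_index : List Int) : Int :=
  let total := PySem.List.pyGetD arr idx 0
  let n : Int := arr.length
  let g := pvGcdLoop (PySem.Int.mod step n).toNat n (PySem.Int.mod step n)
  let r := PySem.Int.mod idx g
  let total' := (PySem.List.pyRange 0 n 1).foldl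
      (fun t j => if PySem.Int.mod j g = r ∧ j ≠ idx then t + PySem.List.pyGetD arr j 0 else t) total
  if (PySem.Int.floordiv n g) * step ≠ n then (10:Int)^9 else total'

-- ===== PRECONDITION & SPEC =====
-- Pre_ excludes exactly: empty arr / out-of-range idx (A raises IndexError) and
-- negative in-range idx (A's while loop never returns to a negative idx: it diverges).
def Pre_compute_sum (arr : List Int) (idx : Int) (step : Int) (comp_index : List Int) : Prop :=
  0 ≤ idx ∧ idx < (arr.length : Int)
instance (arr : List Int) (idx : Int) (step : Int) (comp_index : List Int) : Decidable (Pre_compute_sum arr idx step comp_index) := by unfold Pre_compute_sum; infer_instance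
def pvWitness_compute_sum : List Int × Int × Int × List Int := ([1, 2, 3], 0, 1, [])

def Spec_compute_sum (arr : List Int) (idx : Int) (step : Int) (comp_index : List Int) (out : Int) : Prop := out = compute_sum_alt arr idx step comp_index
instance (arr : List Int) (idx : Int) (step : Int) (comp_index : List Int) (out : Int) : Decidable (Spec_compute_sum arr idx step comp_index out) := by unfold Spec_compute_sum; infer_instance

-- ===== CLAIM (what is proved, stated in full; the proofs are below) =====
def Claim_equal_compute_sum : Prop := ∀ (arr : List Int) (idx : Int) (step : Int) (comp_index : List Int), Dom_compute_sum arr idx step comp_index → Pre_compute_sum arr idx step comp_index → Spec_compute_sum arr idx step comp_index (compute_sum arr idx step comp_index)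

-- ===== LEMMAS AND PROOFS =====

lemma pv_dvd_iff (n s k : Nat) (hn : 0 < n) : n ∣ k * s ↔ (n / Nat.gcd n s) ∣ k := by
  set g := Nat.gcd n s with hg
  have hgpos : 0 < g := Nat.gcd_pos_of_pos_left s hn
  have hng : g * (n / g) = n := Nat.mul_div_cancel' (Nat.gcd_dvd_left n s)
  have hsg : g * (s / g) = s := Nat.mul_div_cancel' (Nat.gcd_dvd_right n s)
  have hcop : Nat.Coprime (n / g) (s / g) := Nat.coprime_div_gcd_div_gcd hgpos
  constructor
  · rintro ⟨t, ht⟩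
    have h2 : (n / g) ∣ k * (s / g) := by
      refine ⟨t, Nat.eq_of_mul_eq_mul_left hgpos ?_⟩
      calc g * (k * (s / g)) = k * (g * (s / g)) := by ring
        _ = k * s := by rw [hsg]
        _ = n * t := ht
        _ = g * (n / g * t) := by rw [← mul_assoc, hng]
    exact Nat.Coprime.dvd_of_dvd_mul_right hcop h2
  · rintro ⟨t, ht⟩
    refine ⟨t * (s / g), ?_⟩
    calc k * s = (n / g * t) * (g * (s / g)) := by rw [← ht, hsg]
      _ = (g * (n / g)) * (t * (s / g)) := by ring
      _ = n * (t * (s / g)) := by rw [hng]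

def pvPos (i s n k : Nat) : Nat := (i + k * s) % n

lemma pv_pos_eq_iff (i s n k : Nat) (hn : 0 < n) (hi : i < n) :
    pvPos i s n k = i ↔ (n / Nat.gcd n s) ∣ k := by
  rw [← pv_dvd_iff n s k hn]
  unfold pvPos
  rw [Nat.add_mod, Nat.mod_eq_of_lt hi]
  have hr : k * s % n < n := Nat.mod_lt _ hn
  constructor
  · intro h
    by_cases hlt : i + k * s % n < n
    · rw [Nat.mod_eq_of_lt hlt] at h
      have : k * s % n = 0 := by omega
      exact Nat.dvd_of_mod_eq_zero this
    · rw [Nat.mod_eq_sub_mod (by omega), Nat.mod_eq_of_lt (by omega)] at h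
      omega
  · intro h
    have h0 : k * s % n = 0 := Nat.eq_zero_of_dvd_of_lt ((Nat.dvd_mod_iff dvd_rfl).mpr h) hr
    rw [h0, Nat.add_zero, Nat.mod_eq_of_lt hi]

lemma pvGcdLoop_eq : ∀ (fuel a b : Nat), b ≤ fuel →
    pvGcdLoop fuel (a : Int) (b : Int) = (Nat.gcd a b : Int) := by
  intro fuel
  induction fuel with
  | zero =>
    intro a b hb
    have hb0 : b = 0 := by omega
    subst hb0; simp [pvGcdLoop]
  | succ f ih =>
    intro a b hb
    by_cases h0 : b = 0
    · subst h0; simp [pvGcdLoop]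
    · have hbz : ((b : Int)) ≠ 0 := by exact_mod_cast h0
      have hmlt : a % b < b := Nat.mod_lt _ (by omega)
      unfold pvGcdLoop
      simp only [hbz, if_false]
      rw [PySem.Int.mod_natCast, ih b (a % b) (by omega)]
      congr 1
      rw [Nat.gcd_comm a b, Nat.gcd_rec b a, Nat.gcd_comm (a % b) b]

lemma pv_pymod (n i s : Nat) (hn : 0 < n) (x : Int) (k : Nat)
    (h : x % (n : Int) = ((i : Int) + (k : Int) * (s : Int)) % (n : Int)) :
    PySem.Int.mod x (n : Int) = ((pvPos i s n k : Nat) : Int) := by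
  rw [PySem.Int.mod_eq_emod_of_pos (by exact_mod_cast hn), h]
  unfold pvPos
  push_cast
  ring_nf

def pvS (arr : List Int) (i s n j : Nat) : Int := ∑ k ∈ Finset.range j, arr.getD (pvPos i s n k) 0

lemma pv_pos_cast (i s n j : Nat) :
    ((pvPos i s n j : Nat) : Int) = ((i : Int) + (j : Int) * (s : Int)) % (n : Int) := by
  unfold pvPos; push_cast; ring_nf

lemma pv_hnext (arr : List Int) (idx step : Int) (i s : Nat)
    (hn : 0 < arr.length) (hs : (s : Int) = step % (arr.length : Int)) (j : Nat) :
    PySem.Int.mod (((pvPos i s arr.length j : Nat) : Int) + step) (arr.length : Int)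
      = ((pvPos i s arr.length (j + 1) : Nat) : Int) := by
  have hstep : step ≡ (s : Int) [ZMOD (arr.length : Int)] := by
    rw [Int.ModEq, hs]; exact (Int.emod_emod_of_dvd step dvd_rfl).symm
  apply pv_pymod _ _ _ hn
  have h1 : ((pvPos i s arr.length j : Nat) : Int) + step
      ≡ ((i : Int) + (j : Int) * (s : Int) + (s : Int)) [ZMOD (arr.length : Int)] := by
    rw [pv_pos_cast]
    exact Int.ModEq.add (Int.emod_emod_of_dvd _ dvd_rfl) hstep
  have h2 : ((i : Int) + (j : Int) * (s : Int) + (s : Int))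
      = ((i : Int) + ((j : Nat) + 1 : Int) * (s : Int)) := by ring
  have := h1.trans (by rw [h2])
  simpa using this

lemma pvLoopA_eq (arr : List Int) (idx step : Int) (i s : Nat)
    (hn : 0 < arr.length) (hi : i < arr.length) (hidx : idx = (i : Int))
    (hs : (s : Int) = step % (arr.length : Int)) :
    ∀ (fuel j : Nat), 1 ≤ j → j ≤ arr.length / Nat.gcd arr.length s →
      arr.length / Nat.gcd arr.length s - j ≤ fuel →
      pvLoopA arr idx step fuel ((pvPos i s arr.length j : Nat) : Int)
        (pvS arr i s arr.length j) ((j : Nat) : Int)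
        = (pvS arr i s arr.length (arr.length / Nat.gcd arr.length s),
           ((arr.length / Nat.gcd arr.length s : Nat) : Int)) := by
  intro fuel
  induction fuel with
  | zero =>
    intro j hj1 hjc hf
    have hj : j = arr.length / Nat.gcd arr.length s := by omega
    have hpos : pvPos i s arr.length j = i :=
      (pv_pos_eq_iff i s arr.length j hn hi).mpr (hj ▸ dvd_rfl)
    unfold pvLoopA
    rw [if_pos (by rw [hpos, hidx]), hj]
  | succ f ih =>
    intro j hj1 hjc hf
    by_cases hdone : pvPos i s arr.length j = i
    · have hdvd := (pv_pos_eq_iff i s arr.length j hn hi).mp hdone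
      have hj : j = arr.length / Nat.gcd arr.length s :=
        Nat.le_antisymm hjc (Nat.le_of_dvd (by omega) hdvd)
      unfold pvLoopA
      rw [if_pos (by rw [hdone, hidx]), hj]
    · have hjlt : j < arr.length / Nat.gcd arr.length s := by
        rcases Nat.lt_or_ge j (arr.length / Nat.gcd arr.length s) with h | h
        · exact h
        · exact absurd ((pv_pos_eq_iff i s arr.length j hn hi).mpr
            (by have : j = arr.length / Nat.gcd arr.length s := by omega
                rw [this])) hdone
      have hne : ((pvPos i s arr.length j : Nat) : Int) ≠ idx := by
        rw [hidx]; exact_mod_cast hdone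
      unfold pvLoopA
      rw [if_neg hne, pv_hnext arr idx step i s hn hs j]
      have hacc : pvS arr i s arr.length j + PySem.List.pyGetD arr ((pvPos i s arr.length j : Nat) : Int) 0
          = pvS arr i s arr.length (j + 1) := by
        rw [PySem.List.pyGetD_natCast]
        exact (Finset.sum_range_succ _ _).symm
      have hcnt : ((j : Nat) : Int) + 1 = (((j + 1 : Nat)) : Int) := by push_cast; ring
      rw [hacc, hcnt]
      exact ih (j + 1) (by omega) (by omega) (by omega)

-- B's scan over range(n) with the residue-class-and-not-idx test, as a 0/else sum over range m
lemma pvFoldB (arr : List Int) (g r i : Nat) (t0 : Int) (m : Nat) :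
    (PySem.List.pyRange 0 ((m : Nat) : Int) 1).foldl
      (fun t j => if PySem.Int.mod j ((g : Nat) : Int) = ((r : Nat) : Int) ∧ j ≠ ((i : Nat) : Int)
                  then t + PySem.List.pyGetD arr j 0 else t) t0
      = t0 + ∑ j ∈ Finset.range m, if j % g = r ∧ j ≠ i then arr.getD j 0 else 0 := by
  induction m with
  | zero => simp [PySem.List.pyRange_one_eq_nil (le_refl (0 : Int))]
  | succ m ih =>
    have hcast : (((m + 1 : Nat)) : Int) = ((m : Nat) : Int) + 1 := by push_cast; ring
    rw [hcast, PySem.List.pyRange_one_succ_right (by exact_mod_cast Nat.zero_le m),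
      List.foldl_append, ih, Finset.sum_range_succ]
    simp only [List.foldl_cons, List.foldl_nil, PySem.Int.mod_natCast,
      PySem.List.pyGetD_natCast]
    by_cases hp : m % g = r ∧ m ≠ i
    · rw [if_pos (by exact_mod_cast hp), if_pos hp, add_assoc]
    · rw [if_neg (by push_cast; exact_mod_cast hp), if_neg hp, add_zero]

-- summing the class = seeding with index i and summing the class minus i
lemma pv_seed_split (n g i : Nat) (a : Nat → Int) (hin : i < n) :
    (∑ j ∈ Finset.range n, if j % g = i % g then a j else 0)
      = a i + ∑ j ∈ Finset.range n, if j % g = i % g ∧ j ≠ i then a j else 0 := by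
  rw [← Finset.sum_filter, ← Finset.sum_filter]
  have hfe : (Finset.range n).filter (fun j => j % g = i % g ∧ j ≠ i)
      = ((Finset.range n).filter (fun j => j % g = i % g)).erase i := by
    rw [← Finset.filter_ne', Finset.filter_filter]
  have hmem : i ∈ (Finset.range n).filter (fun j => j % g = i % g) := by
    rw [Finset.mem_filter, Finset.mem_range]; exact ⟨hin, rfl⟩
  rw [hfe, Finset.add_sum_erase _ a hmem]

-- injectivity of the cycle map k ↦ (i + k*s) % n on range (n / gcd n s)
lemma pv_inj (i s n : Nat) (hn : 0 < n) {k1 k2 : Nat}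
    (h1 : k1 < n / Nat.gcd n s) (h2 : k2 < n / Nat.gcd n s)
    (he : pvPos i s n k1 = pvPos i s n k2) : k1 = k2 := by
  have key : ∀ a b : Nat, a ≤ b → b < n / Nat.gcd n s →
      pvPos i s n a = pvPos i s n b → a = b := by
    intro a b hab hb hab_eq
    have hm : Nat.ModEq n (i + a * s) (i + b * s) := hab_eq
    have hm2 : Nat.ModEq n (a * s) (b * s) := Nat.ModEq.add_left_cancel' i hm
    have hdvd : n ∣ b * s - a * s := (Nat.modEq_iff_dvd' (Nat.mul_le_mul_right s hab)).mp hm2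
    rw [← Nat.sub_mul] at hdvd
    have hc : (n / Nat.gcd n s) ∣ (b - a) := (pv_dvd_iff n s (b - a) hn).mp hdvd
    have hlt : b - a < n / Nat.gcd n s := by omega
    have := Nat.eq_zero_of_dvd_of_lt hc hlt
    omega
  rcases le_total k1 k2 with h | h
  · exact key k1 k2 h h2 he
  · exact (key k2 k1 h h1 he.symm).symm

-- the cycle sum equals the residue-class sum over the whole array
lemma pv_cycle_eq_class (arr : List Int) (i s : Nat)
    (hn : 0 < arr.length) (hi : i < arr.length) :
    (∑ j ∈ Finset.range arr.length,
        if j % Nat.gcd arr.length s = i % Nat.gcd arr.length s then arr.getD j 0 else 0)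
      = pvS arr i s arr.length (arr.length / Nat.gcd arr.length s) := by
  set n := arr.length with hndef
  set g := Nat.gcd n s with hgdef
  have hgpos : 0 < g := Nat.gcd_pos_of_pos_left s hn
  set c := n / g with hcdef
  have hng : g * c = n := Nat.mul_div_cancel' (Nat.gcd_dvd_left n s)
  obtain ⟨t, hst⟩ := Nat.gcd_dvd_right n s
  set S : Finset Nat := (Finset.range n).filter (fun j => j % g = i % g) with hSdef
  set S' : Finset Nat := (Finset.range c).image (fun k => pvPos i s n k) with hS'def
  have hinj : Set.InjOn (fun k => pvPos i s n k) (Finset.range c) := by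
    intro a ha b hb hab
    exact pv_inj i s n hn (by simpa using ha) (by simpa using hb) hab
  have hsub : S' ⊆ S := by
    intro j hj
    rw [hS'def, Finset.mem_image] at hj
    obtain ⟨k, _, hk⟩ := hj
    rw [hSdef, Finset.mem_filter, Finset.mem_range]
    subst hk
    constructor
    · exact Nat.mod_lt _ hn
    · show pvPos i s n k % g = i % g
      unfold pvPos
      rw [Nat.mod_mod_of_dvd _ (Nat.gcd_dvd_left n s)]
      have : i + k * s = i + g * (k * t) := by rw [hst]; ring
      rw [this, Nat.add_mul_mod_self_left]
  have hcardS' : S'.card = c := by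
    rw [hS'def, Finset.card_image_of_injOn hinj, Finset.card_range]
  have hcardS : S.card ≤ c := by
    have hsub2 : S ⊆ (Finset.range c).image (fun u => i % g + u * g) := by
      intro j hj
      rw [hSdef, Finset.mem_filter, Finset.mem_range] at hj
      obtain ⟨hjn, hjr⟩ := hj
      rw [Finset.mem_image]
      refine ⟨j / g, ?_, ?_⟩
      · rw [Finset.mem_range]
        rw [Nat.div_lt_iff_lt_mul hgpos, mul_comm c g]
        omega
      · have := Nat.div_add_mod j g
        rw [mul_comm (j / g) g]
        omega
    calc S.card ≤ ((Finset.range c).image (fun u => i % g + u * g)).card :=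
          Finset.card_le_card hsub2
      _ ≤ c := le_trans Finset.card_image_le (by rw [Finset.card_range])
  have hSeq : S' = S := Finset.eq_of_subset_of_card_le hsub (by omega)
  calc (∑ j ∈ Finset.range n, if j % g = i % g then arr.getD j 0 else 0)
      = ∑ j ∈ S, arr.getD j 0 := (Finset.sum_filter _ _).symm
    _ = ∑ j ∈ S', arr.getD j 0 := by rw [hSeq]
    _ = ∑ k ∈ Finset.range c, arr.getD (pvPos i s n k) 0 := Finset.sum_image (fun a ha b hb h => hinj ha hb h)
    _ = pvS arr i s n c := rfl

theorem pv_main (arr : List Int) (idx step : Int) (comp_index : List Int)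
    (h0 : 0 ≤ idx) (hlt : idx < (arr.length : Int)) :
    compute_sum arr idx step comp_index = compute_sum_alt arr idx step comp_index := by
  have hn : 0 < arr.length := by exact_mod_cast lt_of_le_of_lt h0 hlt
  set i := idx.toNat with hidef
  have hidx : idx = (i : Int) := (Int.toNat_of_nonneg h0).symm
  have hi : i < arr.length := by rw [hidx] at hlt; exact_mod_cast hlt
  have hnz : ((arr.length : Int)) ≠ 0 := by exact_mod_cast Nat.pos_iff_ne_zero.mp hn
  set s := (step % (arr.length : Int)).toNat with hsdef
  have hs : (s : Int) = step % (arr.length : Int) := Int.toNat_of_nonneg (Int.emod_nonneg step hnz)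
  set g := Nat.gcd arr.length s with hgdef
  have hgpos : 0 < g := Nat.gcd_pos_of_pos_left s hn
  set c := arr.length / g with hcdef
  have hc1 : 1 ≤ c := (Nat.one_le_div_iff hgpos).mpr (Nat.le_of_dvd hn (Nat.gcd_dvd_left _ _))
  have hcn : c ≤ arr.length := Nat.div_le_self _ _
  have hS1 : pvS arr i s arr.length 1 = arr.getD i 0 := by
    unfold pvS
    rw [Finset.sum_range_one]
    congr 1
    unfold pvPos
    simp [Nat.mod_eq_of_lt hi]
  have hinit : PySem.List.pyGetD arr ((i : Nat) : Int) 0 = pvS arr i s arr.length 1 := by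
    rw [PySem.List.pyGetD_natCast, hS1]
  have hstart : PySem.Int.mod (((i : Nat) : Int) + step) (arr.length : Int) = ((pvPos i s arr.length 1 : Nat) : Int) := by
    apply pv_pymod _ _ _ hn
    have hstep : step ≡ (s : Int) [ZMOD (arr.length : Int)] := by
      rw [Int.ModEq, hs]; exact (Int.emod_emod_of_dvd step dvd_rfl).symm
    have h1 : ((i : Nat) : Int) + step ≡ (i : Int) + (s : Int) [ZMOD (arr.length : Int)] :=
      Int.ModEq.add (Int.ModEq.refl _) hstep
    simpa using h1
  have hloop := pvLoopA_eq arr ((i : Nat) : Int) step i s hn hi rfl hs arr.length 1 (le_refl 1) hc1 (Nat.le_trans (Nat.sub_le _ _) hcn)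
  rw [Nat.cast_one] at hloop
  have hmods : PySem.Int.mod step (arr.length : Int) = (s : Int) := by
    rw [PySem.Int.mod_eq_emod_of_pos (by exact_mod_cast hn), ← hs]
  have hgcd : pvGcdLoop s (arr.length : Int) (s : Int) = (g : Int) :=
    pvGcdLoop_eq s arr.length s (le_refl s)
  have hcount : PySem.Int.floordiv (arr.length : Int) (g : Int) = ((c : Nat) : Int) := by
    rw [PySem.Int.floordiv_natCast, hcdef]
  have hr : PySem.Int.mod ((i : Nat) : Int) (g : Int) = ((i % g : Nat) : Int) := by
    rw [PySem.Int.mod_natCast]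
  have hfold := pvFoldB arr g (i % g) i (pvS arr i s arr.length 1) arr.length
  simp only [compute_sum, compute_sum_alt]
  rw [hidx]
  rw [hmods, Int.toNat_natCast, hgcd, hr, hcount, hinit, hstart, hloop, hfold,
    ← pv_cycle_eq_class arr i s hn hi, pv_seed_split arr.length g i (fun j => arr.getD j 0) hi, hS1]

-- ===== VERDICT (by name: the statement is the Claim_ definition above) =====
theorem compute_sum_spec : Claim_equal_compute_sum := by
  intro arr idx step comp_index _ hpre
  unfold Spec_compute_sum
  exact pv_main arr idx step comp_index hpre.1 hpre.2
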